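-- pv_equiv track=rewrite | github.com/flashcode/msgcheck | msgcheck/utils.py | replace_formatters
-- ===== SOURCE A (Python) =====
-- STR_FORMATTERS = {
--     'c': ('\\', '%', '#- +\'I.0123456789hlLqjzt', 'diouxXeEfFgGaAcsCSpnm'),
-- }
--
-- def replace_formatters(string, replace, fmt):
--     """
--     Replace formatters (like "%s" or "%03d") with a replacement string.
--     """
--     if fmt not in STR_FORMATTERS:
--         return string
--     formatters = STR_FORMATTERS[fmt]
--     formatter, escape = (False, False)
--     strformat = []
--     result = []
--
--     for char in string:
--         if formatter:
--             if char == formatters[1]: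
--                 result.append(char)
--                 formatter = False
--             elif char in formatters[2]:
--                 strformat.append(char)
--             elif char in formatters[3]:
--                 result.append(replace)
--                 formatter = False
--             else:
--                 strformat.append(char)
--                 result += strformat
--                 formatter = False
--         elif escape:
--             result.append(formatters[0])
--             result.append(char)
--             escape = False
--         elif char == formatters[0]:
--             escape = True
--         elif char == formatters[1]:
--             formatter = True
--             strformat = [char]
--         else:
--             result.append(char)
--
--     if escape:  # unterminated escaped char?
--         result.append(formatters[0])
--     elif formatter:  # unterminated formatter?
--         result.append(replace)
--
--     return ''.join(result)
-- ===== SOURCE B (Python) =====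
-- STR_FORMATTERS = {
--     'c': ('\\', '%', '#- +\'I.0123456789hlLqjzt', 'diouxXeEfFgGaAcsCSpnm'),
-- }
--
-- def replace_formatters(string, replace, fmt):
--     """
--     Replace formatters (like "%s" or "%03d") with a replacement string.
--     """
--     if fmt not in STR_FORMATTERS:
--         return string
--     esc, pct, flags, convs = STR_FORMATTERS[fmt]
--     out = []
--     i = 0
--     n = len(string)
--     while i < n:
--         ch = string[i]
--         if ch == esc:
--             out.append(esc)
--             if i + 1 < n:
--                 out.append(string[i + 1])
--             i += 2
--         elif ch == pct:
--             j = i + 1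
--             while j < n and string[j] in flags:
--                 j += 1
--             if j == n:
--                 out.append(replace)
--             elif string[j] == pct:
--                 out.append(pct)
--             elif string[j] in convs:
--                 out.append(replace)
--             else:
--                 out.append(string[i:j + 1])
--             i = j + 1
--         else:
--             out.append(ch)
--             i += 1
--     return ''.join(out)
-- ===== Notes on version B (the rewrite author's own statement) =====
-- stated objective: alternative
-- what changed: Replaced A's character-by-character state machine (formatter/escape boolean flags with a pending strformat buffer) by a direct index scan that consumes an escape pair in one step and scans each '%'-run of flag characters with an inner loop, deciding the whole formatter at once.
import Mathlib
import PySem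

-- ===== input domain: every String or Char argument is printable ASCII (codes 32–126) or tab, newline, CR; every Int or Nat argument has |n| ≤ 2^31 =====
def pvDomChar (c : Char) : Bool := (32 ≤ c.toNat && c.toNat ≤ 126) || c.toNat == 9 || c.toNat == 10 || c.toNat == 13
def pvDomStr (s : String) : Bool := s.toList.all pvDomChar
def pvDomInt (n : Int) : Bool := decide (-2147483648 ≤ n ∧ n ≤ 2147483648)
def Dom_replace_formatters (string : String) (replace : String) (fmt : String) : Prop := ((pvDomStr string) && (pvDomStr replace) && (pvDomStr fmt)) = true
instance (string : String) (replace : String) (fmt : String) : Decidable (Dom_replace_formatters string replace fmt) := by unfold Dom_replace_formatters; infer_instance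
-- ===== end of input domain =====

-- B replaces A's boolean-flag state machine by a direct scan that consumes an escape
-- pair in one step and the whole '%'+flag-run formatter at once (objective: alternative).

-- STR_FORMATTERS['c'] components (shared constants of the module)
def STRF_esc : Char := '\\'
def STRF_pct : Char := '%'
def STRF_flags : List Char := "#- +'I.0123456789hlLqjzt".toList
def STRF_convs : List Char := "diouxXeEfFgGaAcsCSpnm".toList

-- ===== PORT A =====
-- loop body of A: state = (formatter, escape, strformat, result); result kept as chars
-- (''.join of chars and of `replace` strings = this char list turned into a string)
def rfA_step (replace : String) (st : Bool × Bool × List Char × List Char) (c : Char) :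
    Bool × Bool × List Char × List Char :=
  match st with
  | (formatter, escape, strformat, result) =>
    if formatter then
      if c = STRF_pct then (false, escape, strformat, result ++ [c])
      else if STRF_flags.contains c then (formatter, escape, strformat ++ [c], result)
      else if STRF_convs.contains c then (false, escape, strformat, result ++ replace.toList)
      else (false, escape, strformat ++ [c], result ++ strformat ++ [c])
    else if escape then (formatter, false, strformat, result ++ [STRF_esc, c])
    else if c = STRF_esc then (formatter, true, strformat, result)
    else if c = STRF_pct then (true, escape, [c], result)
    else (formatter, escape, strformat, result ++ [c])

-- the trailing "if escape ... elif formatter ..." fixup of A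
def rfA_fin (replace : String) (st : Bool × Bool × List Char × List Char) : List Char :=
  match st with
  | (formatter, escape, _, result) =>
    if escape then result ++ [STRF_esc]
    else if formatter then result ++ replace.toList
    else result

def replace_formatters (string : String) (replace : String) (fmt : String) : String :=
  if fmt ≠ "c" then string
  else
    String.mk (rfA_fin replace (string.toList.foldl (rfA_step replace) (false, false, [], [])))

-- ===== PORT B =====
-- inner `while` of B: split off the leading run of flag characters
def rfB_span : List Char → List Char × List Char
  | [] => ([], [])
  | c :: rest =>
    if STRF_flags.contains c then
      let p := rfB_span rest
      (c :: p.1, p.2)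
    else ([], c :: rest)

theorem rfB_span_len : ∀ l : List Char, (rfB_span l).2.length ≤ l.length := by
  intro l
  induction l with
  | nil => simp [rfB_span]
  | cons c rest ih =>
    simp only [rfB_span]
    split
    · simp only [List.length_cons]; omega
    · simp

-- outer `while` of B, as recursion on the remaining characters
def rfB_go (replace : String) : List Char → List Char
  | [] => []
  | c :: rest =>
    if c = STRF_esc then
      match rest with
      | [] => [STRF_esc]
      | d :: rest' => STRF_esc :: d :: rfB_go replace rest'
    else if c = STRF_pct then
      match h : (rfB_span rest).2 with
      | [] => replace.toList
      | d :: r' =>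
        if d = STRF_pct then STRF_pct :: rfB_go replace r'
        else if STRF_convs.contains d then replace.toList ++ rfB_go replace r'
        else (STRF_pct :: (rfB_span rest).1 ++ [d]) ++ rfB_go replace r'
  else c :: rfB_go replace rest
termination_by l => l.length
decreasing_by
  all_goals simp only [List.length_cons]
  all_goals try omega
  all_goals
    (have hs := rfB_span_len rest
     rw [h] at hs
     simp only [List.length_cons] at hs
     omega)

def replace_formatters_alt (string : String) (replace : String) (fmt : String) : String :=
  if fmt ≠ "c" then string
  else String.mk (rfB_go replace string.toList)

-- ===== PRECONDITION & SPEC =====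
def Spec_replace_formatters (string : String) (replace : String) (fmt : String) (out : String) : Prop := out = replace_formatters_alt string replace fmt
instance (string : String) (replace : String) (fmt : String) (out : String) : Decidable (Spec_replace_formatters string replace fmt out) := by unfold Spec_replace_formatters; infer_instance

-- ===== CLAIM (what is proved, stated in full; the proofs are below) =====
def Claim_equal_replace_formatters : Prop := ∀ (string : String) (replace : String) (fmt : String), Dom_replace_formatters string replace fmt → Spec_replace_formatters string replace fmt (replace_formatters string replace fmt)

-- ===== LEMMAS AND PROOFS =====

-- B's output viewed from A's escape state
def goE (replace : String) : List Char → List Char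
  | [] => [STRF_esc]
  | d :: rest' => STRF_esc :: d :: rfB_go replace rest'

-- B's output viewed from A's formatter state with pending flags fl0
def goF (replace : String) (fl0 : List Char) (l : List Char) : List Char :=
  match (rfB_span l).2 with
  | [] => replace.toList
  | d :: r' =>
    if d = STRF_pct then STRF_pct :: rfB_go replace r'
    else if STRF_convs.contains d then replace.toList ++ rfB_go replace r'
    else (STRF_pct :: (fl0 ++ (rfB_span l).1) ++ [d]) ++ rfB_go replace r'

theorem rfB_go_esc (replace : String) (l : List Char) :
    rfB_go replace (STRF_esc :: l) = goE replace l := by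
  cases l <;> simp [rfB_go, goE, STRF_esc]

theorem rfB_go_pct (replace : String) (l : List Char) :
    rfB_go replace (STRF_pct :: l) = goF replace [] l := by
  rw [rfB_go.eq_def]
  simp only [show (STRF_pct = STRF_esc) = False by simp [STRF_pct, STRF_esc],
             show (STRF_pct = STRF_pct) = True by simp, if_true, if_false]
  split <;> rename_i h <;> rw [goF, h] <;> simp

theorem rfB_go_other (replace : String) (c : Char) (l : List Char)
    (he : c ≠ STRF_esc) (hp : c ≠ STRF_pct) :
    rfB_go replace (c :: l) = c :: rfB_go replace l := by
  rw [rfB_go.eq_def]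
  simp [he, hp]

theorem goF_flag (replace : String) (fl0 : List Char) (c : Char) (l : List Char)
    (hc : c ∈ STRF_flags) :
    goF replace fl0 (c :: l) = goF replace (fl0 ++ [c]) l := by
  cases hsp : (rfB_span l).2 <;> simp [goF, rfB_span, hc, hsp]

theorem goF_stop (replace : String) (fl0 : List Char) (c : Char) (l : List Char)
    (hc : c ∉ STRF_flags) :
    goF replace fl0 (c :: l) =
      (if c = STRF_pct then STRF_pct :: rfB_go replace l
       else if STRF_convs.contains c then replace.toList ++ rfB_go replace l
       else (STRF_pct :: (fl0 ++ [c])) ++ rfB_go replace l) := by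
  simp only [goF, rfB_span]
  simp [hc]

-- the simultaneous invariant over A's three reachable states
theorem main_inv (replace : String) : ∀ (l : List Char) (sf res : List Char),
    rfA_fin replace (l.foldl (rfA_step replace) (false, false, sf, res)) = res ++ rfB_go replace l
  ∧ rfA_fin replace (l.foldl (rfA_step replace) (false, true, sf, res)) = res ++ goE replace l
  ∧ ∀ fl0, rfA_fin replace (l.foldl (rfA_step replace) (true, false, STRF_pct :: fl0, res)) = res ++ goF replace fl0 l := by
  intro l
  induction l with
  | nil =>
    intro sf res
    refine ⟨?_, ?_, ?_⟩
    · simp [rfA_fin, rfB_go]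
    · simp [rfA_fin, goE]
    · intro fl0; simp [rfA_fin, goF, rfB_span]
  | cons c rest ih =>
    intro sf res
    refine ⟨?_, ?_, ?_⟩
    · -- normal state
      rw [List.foldl_cons]
      by_cases he : c = STRF_esc
      · have hstep : rfA_step replace (false, false, sf, res) c = (false, true, sf, res) := by
          simp [rfA_step, he]
        rw [hstep, he, rfB_go_esc]
        exact (ih sf res).2.1
      · by_cases hp : c = STRF_pct
        · have hstep : rfA_step replace (false, false, sf, res) c = (true, false, [c], res) := by
            simp [rfA_step, he, hp]
            try decide
          rw [hstep, hp, rfB_go_pct]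
          exact (ih sf res).2.2 []
        · have hstep : rfA_step replace (false, false, sf, res) c = (false, false, sf, res ++ [c]) := by
            simp [rfA_step, he, hp]
          rw [hstep, rfB_go_other replace c rest he hp, (ih sf (res ++ [c])).1]
          simp
    · -- escape state
      rw [List.foldl_cons]
      have hstep : rfA_step replace (false, true, sf, res) c = (false, false, sf, res ++ [STRF_esc, c]) := by
        simp [rfA_step]
      rw [hstep, (ih sf (res ++ [STRF_esc, c])).1]
      simp [goE]
    · -- formatter state
      intro fl0
      rw [List.foldl_cons]
      by_cases hp : c = STRF_pct
      · have hstep : rfA_step replace (true, false, STRF_pct :: fl0, res) c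
            = (false, false, STRF_pct :: fl0, res ++ [c]) := by
          simp [rfA_step, hp]
        rw [hstep, (ih (STRF_pct :: fl0) (res ++ [c])).1, hp,
            goF_stop replace fl0 STRF_pct rest (by decide)]
        simp
      · by_cases hf : c ∈ STRF_flags
        · have hstep : rfA_step replace (true, false, STRF_pct :: fl0, res) c
              = (true, false, STRF_pct :: (fl0 ++ [c]), res) := by
            simp [rfA_step, hp, hf]
          rw [hstep, (ih sf res).2.2 (fl0 ++ [c]), goF_flag replace fl0 c rest hf]
        · by_cases hc : c ∈ STRF_convs
          · have hstep : rfA_step replace (true, false, STRF_pct :: fl0, res) c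
                = (false, false, STRF_pct :: fl0, res ++ replace.toList) := by
              simp [rfA_step, hp, hf, hc]
            rw [hstep, (ih (STRF_pct :: fl0) (res ++ replace.toList)).1,
                goF_stop replace fl0 c rest hf]
            simp [hp, hc]
          · have hstep : rfA_step replace (true, false, STRF_pct :: fl0, res) c
                = (false, false, STRF_pct :: (fl0 ++ [c]), res ++ (STRF_pct :: fl0) ++ [c]) := by
              simp [rfA_step, hp, hf, hc]
            rw [hstep, (ih (STRF_pct :: (fl0 ++ [c])) (res ++ (STRF_pct :: fl0) ++ [c])).1,
                goF_stop replace fl0 c rest hf]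
            simp [hp, hc]

-- ===== VERDICT (by name: the statement is the Claim_ definition above) =====
theorem replace_formatters_spec : Claim_equal_replace_formatters := by
  intro string replace fmt _
  unfold Spec_replace_formatters replace_formatters replace_formatters_alt
  by_cases h : fmt = "c"
  · have := (main_inv replace string.toList [] []).1
    simp only [List.nil_append] at this
    simp [h, this]
  · simp [h]
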